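-- pv_equiv track=rewrite | github.com/mindedal/advent-of-code | tests/2025/test_06.py | _build_worksheet
-- ===== SOURCE A (Python) =====
-- def _build_worksheet(problems):
--     """Construct worksheet rows from structured data for testing."""
--
--     operand_count = len(problems[0][0])
--     if any(len(ops) != operand_count for ops, _ in problems):
--         raise ValueError("All problems must have the same number of operands")
--
--     rows = ["" for _ in range(operand_count + 1)]
--     for idx, (operands, op) in enumerate(problems):
--         width = max(len(str(n)) for n in operands)
--         for r, value in enumerate(operands):
--             rows[r] += str(value).rjust(width)
--         rows[-1] += op.rjust(width)
--
--         if idx != len(problems) - 1: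
--             for r in range(len(rows)):
--                 rows[r] += " "
--
--     return rows
-- ===== SOURCE B (Python) =====
-- def _build_worksheet(problems):
--     """Construct worksheet rows from structured data for testing."""
--
--     operand_count = len(problems[0][0])
--     if any(len(ops) != operand_count for ops, _ in problems):
--         raise ValueError("All problems must have the same number of operands")
--
--     cols = []
--     for operands, op in problems:
--         width = max(len(str(n)) for n in operands)
--         cols.append([str(v).rjust(width) for v in operands] + [op.rjust(width)])
--
--     return [" ".join(col[r] for col in cols) for r in range(operand_count + 1)]
-- ===== Notes on version B (the rewrite author's own statement) =====
-- stated objective: simpler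
-- what changed: B builds per-problem column blocks (rjust-padded operand strings plus the op string) and then produces each output row in one pass by transposing: joining the r-th entry of every column with ' ' -- replacing A's in-place row-string accumulation and its last-problem separator branch.
import Mathlib
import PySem

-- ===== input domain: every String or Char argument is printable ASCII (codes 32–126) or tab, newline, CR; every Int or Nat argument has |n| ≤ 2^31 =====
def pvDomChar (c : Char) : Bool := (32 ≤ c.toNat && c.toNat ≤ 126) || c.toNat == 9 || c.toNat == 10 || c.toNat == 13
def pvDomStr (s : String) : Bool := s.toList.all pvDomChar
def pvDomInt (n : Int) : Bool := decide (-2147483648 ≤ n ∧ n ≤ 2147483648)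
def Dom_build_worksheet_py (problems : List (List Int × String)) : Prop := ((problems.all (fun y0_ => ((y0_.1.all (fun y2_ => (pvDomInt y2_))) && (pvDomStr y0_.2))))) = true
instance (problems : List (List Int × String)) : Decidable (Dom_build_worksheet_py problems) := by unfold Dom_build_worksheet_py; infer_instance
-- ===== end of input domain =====

-- B builds per-problem column blocks and emits each row by transposing (join with " "),
-- replacing A's in-place row accumulation and its last-problem separator branch; objective: simpler.


-- ===== PORT A =====
-- s.rjust(w): pad on the left with spaces to width w (exact: Nat subtraction clamps like Python's no-pad case)
def pvRjust (s : List Char) (w : Nat) : List Char :=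
  List.replicate (w - s.length) ' ' ++ s

-- width = max(len(str(n)) for n in operands); max() of the empty generator raises ValueError (excluded by Pre_)
def pvWidth (ops : List Int) : Nat :=
  (PySem.List.max? (ops.map (fun v => (PySem.Int.toChars v).length)) (fun x => x)).getD 0

def build_worksheet_py (problems : List (List Int × String)) : List String :=
  match problems with
  | [] => []  -- problems[0] raises IndexError (excluded by Pre_)
  | (ops0, _) :: _ =>
    let n := ops0.length
    if problems.any (fun p => p.1.length ≠ n) then []  -- raise ValueError (excluded by Pre_)
    else
      let m := problems.length
      let rows0 : List (List Char) := (List.range (n + 1)).map (fun _ => [])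
      let final := (PySem.List.enumerate problems).foldl
        (fun rows ip =>
          let w := pvWidth ip.2.1
          -- for r, value in enumerate(operands): rows[r] += str(value).rjust(width)
          let rows1 := (PySem.List.enumerate ip.2.1).foldl
            (fun rs rv => rs.modify rv.1.toNat (· ++ pvRjust (PySem.Int.toChars rv.2) w)) rows
          -- rows[-1] += op.rjust(width)
          let rows2 := rows1.modify (rows1.length - 1) (· ++ pvRjust ip.2.2.toList w)
          if ip.1 ≠ (m : Int) - 1 then rows2.map (· ++ [' ']) else rows2)
        rows0
      final.map String.ofList

-- ===== PORT B =====
-- one problem's column block: rjust-padded operand strings followed by the rjust-padded op string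
def pvCol (p : List Int × String) : List (List Char) :=
  let w := pvWidth p.1
  p.1.map (fun v => pvRjust (PySem.Int.toChars v) w) ++ [pvRjust p.2.toList w]

def build_worksheet_py_alt (problems : List (List Int × String)) : List String :=
  match problems with
  | [] => []  -- problems[0] raises IndexError (excluded by Pre_)
  | (ops0, _) :: _ =>
    let n := ops0.length
    if problems.any (fun p => p.1.length ≠ n) then []  -- raise ValueError (excluded by Pre_)
    else
      let cols := problems.map pvCol
      (List.range (n + 1)).map (fun r =>
        String.ofList (PySem.Chars.join [' '] (cols.map (fun col => col.getD r []))))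

-- ===== PRECONDITION & SPEC =====
-- Pre_ excludes exactly the inputs where A (and B) raise: empty problems (IndexError),
-- an empty first operand list (ValueError from max() over an empty generator),
-- and mismatched operand counts (the explicit ValueError).
def Pre_build_worksheet_py (problems : List (List Int × String)) : Prop :=
  problems ≠ [] ∧ 0 < (problems.headI).1.length ∧
    ∀ p ∈ problems, p.1.length = (problems.headI).1.length
instance (problems : List (List Int × String)) : Decidable (Pre_build_worksheet_py problems) := by unfold Pre_build_worksheet_py; infer_instance

def pvWitness_build_worksheet_py : (List (List Int × String)) :=
  [([12, 3], "+"), ([4, 56], "*")]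

def Spec_build_worksheet_py (problems : List (List Int × String)) (out : List String) : Prop := out = build_worksheet_py_alt problems
instance (problems : List (List Int × String)) (out : List String) : Decidable (Spec_build_worksheet_py problems out) := by unfold Spec_build_worksheet_py; infer_instance

-- ===== CLAIM (what is proved, stated in full; the proofs are below) =====
def Claim_equal_build_worksheet_py : Prop := ∀ (problems : List (List Int × String)), Dom_build_worksheet_py problems → Pre_build_worksheet_py problems → Spec_build_worksheet_py problems (build_worksheet_py problems)

-- ===== LEMMAS AND PROOFS =====

-- join columns left to right, a single space between consecutive column entries
def pvSepJoin : List (List (List Char)) → List (List Char)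
  | [] => []
  | [c] => c
  | c :: c' :: cs => List.zipWith (fun a b => a ++ ' ' :: b) c (pvSepJoin (c' :: cs))

-- (l ++ [x]) modified at the last position
theorem pv_modify_last {α : Type} (l : List α) (x : α) (f : α → α) :
    (l ++ [x]).modify l.length f = l ++ [f x] := by
  induction l with
  | nil => simp
  | cons a t ih => simp [List.modify_succ_cons, ih]

-- enumerate with a shifted start
theorem pv_enumerate_shift {α : Type} (xs : List α) (s : Int) :
    PySem.List.enumerate xs (s + 1) = (PySem.List.enumerate xs s).map (fun p => (p.1 + 1, p.2)) := by
  induction xs generalizing s with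
  | nil => simp [PySem.List.enumerate_nil]
  | cons a t ih => simp [PySem.List.enumerate_cons, ih]

theorem pv_enumerate_one {α : Type} (xs : List α) :
    PySem.List.enumerate xs 1 = (PySem.List.enumerate xs 0).map (fun p => (p.1 + 1, p.2)) := by
  simpa using pv_enumerate_shift xs 0

-- the modify-fold over shifted indices passes the head row through
theorem pv_shift_foldl {α : Type} (g : α → List Char → List Char) (l : List (Int × α))
    (x : List Char) (rows : List (List Char)) (hpos : ∀ p ∈ l, 0 ≤ p.1) :
    (l.map (fun p => (p.1 + 1, p.2))).foldl (fun rs rv => rs.modify rv.1.toNat (g rv.2)) (x :: rows)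
      = x :: l.foldl (fun rs rv => rs.modify rv.1.toNat (g rv.2)) rows := by
  induction l generalizing x rows with
  | nil => simp
  | cons p t ih =>
    have h0 : (0:Int) ≤ p.1 := hpos p (by simp)
    have h1 : (p.1 + 1).toNat = p.1.toNat + 1 := by omega
    simp only [List.map_cons, List.foldl_cons, h1, List.modify_succ_cons]
    exact ih _ _ (fun q hq => hpos q (by simp [hq]))

-- A's inner loop (rows[r] += f(operands[r])) appends columnwise
theorem pv_inner {α : Type} (f : α → List Char) (ops : List α) (rows : List (List Char))
    (h : ops.length ≤ rows.length) :
    (PySem.List.enumerate ops).foldl (fun rs rv => rs.modify rv.1.toNat (· ++ f rv.2)) rows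
      = List.zipWith (fun a v => a ++ f v) rows ops ++ rows.drop ops.length := by
  induction ops generalizing rows with
  | nil => simp [PySem.List.enumerate_nil]
  | cons v vs ih =>
    cases rows with
    | nil => simp at h
    | cons r rs =>
      have hpos : ∀ p ∈ PySem.List.enumerate vs, (0:Int) ≤ p.1 := by
        intro p hp
        rcases (PySem.List.mem_enumerate_iff vs 0 p).mp hp with ⟨k, hk, rfl⟩
        omega
      simp only [PySem.List.enumerate_cons, List.foldl_cons, zero_add, Int.toNat_zero,
        List.modify_zero_cons]
      rw [pv_enumerate_one]
      have H := pv_shift_foldl (fun v x => x ++ f v) (PySem.List.enumerate vs) (r ++ f v) rs hpos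
      simp only [] at H
      rw [H, ih rs (by simp only [List.length_cons] at h; omega)]
      simp

theorem pv_pvCol_length (p : List Int × String) : (pvCol p).length = p.1.length + 1 := by
  simp [pvCol]

-- one full problem step of A's loop = append the column block pointwise
theorem pv_applyCol (ops : List Int) (op : String) (rows : List (List Char))
    (h : rows.length = ops.length + 1) :
    ((PySem.List.enumerate ops).foldl
        (fun rs rv => rs.modify rv.1.toNat (· ++ pvRjust (PySem.Int.toChars rv.2) (pvWidth ops))) rows).modify
      (((PySem.List.enumerate ops).foldl
        (fun rs rv => rs.modify rv.1.toNat (· ++ pvRjust (PySem.Int.toChars rv.2) (pvWidth ops))) rows).length - 1)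
      (· ++ pvRjust op.toList (pvWidth ops))
      = List.zipWith (fun a b => a ++ b) rows (pvCol (ops, op)) := by
  have hne : rows ≠ [] := by intro hr; simp [hr] at h
  obtain ⟨l, x, rfl⟩ : ∃ l x, rows = l ++ [x] :=
    ⟨rows.dropLast, rows.getLast hne, (List.dropLast_append_getLast hne).symm⟩
  have hl : l.length = ops.length := by simp at h; omega
  rw [pv_inner (fun v => pvRjust (PySem.Int.toChars v) (pvWidth ops)) ops (l ++ [x])
    (by simp; omega)]
  have hzip : ∀ (g : Int → List Char),
      List.zipWith (fun a v => a ++ g v) (l ++ [x]) ops = List.zipWith (fun a v => a ++ g v) l ops := by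
    intro g
    conv_lhs => rw [show ops = ops ++ [] from (List.append_nil ops).symm]
    rw [List.zipWith_append hl]
    simp
  rw [hzip]
  have hdrop : (l ++ [x]).drop ops.length = [x] := by rw [← hl]; simp
  rw [hdrop]
  have hlen1 : (List.zipWith (fun a v => a ++ pvRjust (PySem.Int.toChars v) (pvWidth ops)) l ops ++ [x]).length - 1
      = (List.zipWith (fun a v => a ++ pvRjust (PySem.Int.toChars v) (pvWidth ops)) l ops).length := by
    simp
  rw [hlen1, pv_modify_last]
  simp only [pvCol]
  rw [List.zipWith_append (by simp [hl])]
  simp [List.zipWith_map_right]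

-- appending a space then joining further columns associates
theorem pv_zip_assoc (l1 l2 l3 : List (List Char)) :
    List.zipWith (fun a b => a ++ b) (List.zipWith (fun a b => a ++ (b ++ [' '])) l1 l2) l3
      = List.zipWith (fun a b => a ++ b) l1 (List.zipWith (fun b c => b ++ ' ' :: c) l2 l3) := by
  induction l1 generalizing l2 l3 with
  | nil => simp
  | cons a t ih => cases l2 <;> cases l3 <;> simp [ih]

theorem pv_sepJoin_length (k : Nat) (cs : List (List (List Char))) (hne : cs ≠ [])
    (h : ∀ c ∈ cs, c.length = k) : (pvSepJoin cs).length = k := by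
  induction cs with
  | nil => exact absurd rfl hne
  | cons c t ih =>
    cases t with
    | nil => simpa [pvSepJoin] using h c (by simp)
    | cons c' t' =>
      have hrec := ih (by simp) (fun d hd => h d (List.mem_cons_of_mem _ hd))
      have hc : c.length = k := h c (by simp)
      simp [pvSepJoin, hrec, hc]

-- A's whole loop over the remaining problems, starting at index i
theorem pv_outer (m n : Nat) (ps : List (List Int × String)) (i : Nat) (rows : List (List Char))
    (hne : ps ≠ []) (hm : i + ps.length = m) (hr : rows.length = n + 1)
    (hlen : ∀ p ∈ ps, p.1.length = n) :
    (PySem.List.enumerate ps i).foldl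
      (fun rows ip =>
        if ip.1 ≠ (m : Int) - 1 then
          List.map (· ++ [' '])
            (((PySem.List.enumerate ip.2.1).foldl
                (fun rs rv => rs.modify rv.1.toNat (· ++ pvRjust (PySem.Int.toChars rv.2) (pvWidth ip.2.1))) rows).modify
              (((PySem.List.enumerate ip.2.1).foldl
                (fun rs rv => rs.modify rv.1.toNat (· ++ pvRjust (PySem.Int.toChars rv.2) (pvWidth ip.2.1))) rows).length - 1)
              (· ++ pvRjust ip.2.2.toList (pvWidth ip.2.1)))
        else
          ((PySem.List.enumerate ip.2.1).foldl
              (fun rs rv => rs.modify rv.1.toNat (· ++ pvRjust (PySem.Int.toChars rv.2) (pvWidth ip.2.1))) rows).modify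
            (((PySem.List.enumerate ip.2.1).foldl
              (fun rs rv => rs.modify rv.1.toNat (· ++ pvRjust (PySem.Int.toChars rv.2) (pvWidth ip.2.1))) rows).length - 1)
            (· ++ pvRjust ip.2.2.toList (pvWidth ip.2.1))) rows
      = List.zipWith (fun a b => a ++ b) rows (pvSepJoin (ps.map pvCol)) := by
  induction ps generalizing i rows with
  | nil => exact absurd rfl hne
  | cons p t ih =>
    cases t with
    | nil =>
      simp only [PySem.List.enumerate_cons, PySem.List.enumerate_nil, List.foldl_cons,
        List.foldl_nil]
      have hcond : ¬ ((i : Int) ≠ (m : Int) - 1) := by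
        simp only [List.length_cons, List.length_nil] at hm; simp; omega
      rw [if_neg hcond, pv_applyCol p.1 p.2 rows (by rw [hr, hlen p (by simp)])]
      simp [pvSepJoin]
    | cons q t' =>
      rw [PySem.List.enumerate_cons, List.foldl_cons]
      simp only []
      have hcond : ((i : Int) ≠ (m : Int) - 1) := by
        simp only [List.length_cons] at hm; simp; omega
      rw [if_pos hcond, pv_applyCol p.1 p.2 rows (by rw [hr, hlen p (by simp)])]
      have hrows' : ((List.zipWith (fun a b => a ++ b) rows (pvCol p)).map (· ++ [' ']))
          = List.zipWith (fun a b => a ++ (b ++ [' '])) rows (pvCol p) := by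
        rw [List.map_zipWith]
        simp [List.append_assoc]
      rw [hrows']
      have hlen' : (List.zipWith (fun a b => a ++ (b ++ [' '])) rows (pvCol p)).length = n + 1 := by
        simp [hr, pv_pvCol_length, hlen p (by simp)]
      have hi : ((i : Int) + 1) = ((i + 1 : Nat) : Int) := by push_cast; ring
      rw [hi, ih (i + 1) _ (by simp) (by simp only [List.length_cons] at hm ⊢; omega) hlen'
        (fun d hd => hlen d (List.mem_cons_of_mem _ hd))]
      rw [pv_zip_assoc]
      simp [pvSepJoin]

-- zipping onto empty rows is a take
theorem pv_zip_replicate (k : Nat) (l : List (List Char)) :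
    List.zipWith (fun a b => a ++ b) (List.replicate k ([] : List Char)) l = l.take k := by
  induction k generalizing l with
  | zero => simp
  | succ n ih => cases l <;> simp [List.replicate_succ, ih]

-- pvSepJoin IS B's transpose-and-join
theorem pv_sepJoin_eq (k : Nat) (cs : List (List (List Char))) (hne : cs ≠ [])
    (h : ∀ c ∈ cs, c.length = k) :
    pvSepJoin cs = (List.range k).map (fun r => PySem.Chars.join [' '] (cs.map (fun col => col.getD r []))) := by
  induction cs with
  | nil => exact absurd rfl hne
  | cons c t ih =>
    cases t with
    | nil =>
      have hc : c.length = k := h c (by simp)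
      simp only [pvSepJoin, List.map_cons, List.map_nil, PySem.Chars.join_singleton]
      apply List.ext_getElem (by simp [hc])
      intro r h1 h2
      simp [List.getElem?_eq_getElem (show r < c.length by omega)]
    | cons q t' =>
      have hrec := ih (by simp) (fun d hd => h d (List.mem_cons_of_mem _ hd))
      have hc : c.length = k := h c (by simp)
      have hlrec : (pvSepJoin (q :: t')).length = k :=
        pv_sepJoin_length k _ (by simp) (fun d hd => h d (List.mem_cons_of_mem _ hd))
      simp only [pvSepJoin]
      apply List.ext_getElem (by simp [hc, hlrec])
      intro r h1 h2
      have hrk : r < k := by simpa using h2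
      have e1 : (pvSepJoin (q :: t')).getD r []
          = PySem.Chars.join [' '] ((q :: t').map (fun col => col.getD r [])) := by
        rw [hrec, List.getD_eq_getElem _ [] (by simp [hrk])]
        simp
      simp only [List.getElem_zipWith, List.getElem_map, List.getElem_range, List.map_cons]
      rw [← List.getD_eq_getElem (pvSepJoin (q :: t')) [] (by omega : r < (pvSepJoin (q :: t')).length), e1]
      rw [PySem.Chars.join_cons_cons]
      simp [List.getElem?_eq_getElem (show r < c.length by omega)]

-- ===== VERDICT (by name: the statement is the Claim_ definition above) =====
theorem build_worksheet_py_spec : Claim_equal_build_worksheet_py := by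
  intro problems hdom hpre
  unfold Spec_build_worksheet_py
  obtain ⟨hne, hpos, hlen⟩ := hpre
  cases problems with
  | nil => exact absurd rfl hne
  | cons p rest =>
    obtain ⟨ops0, op0⟩ := p
    simp only [List.headI] at hpos hlen
    have hany : (((ops0, op0) :: rest).any (fun p => decide ¬(p.1.length = ops0.length))) = false := by
      simp only [List.any_eq_false]
      intro q hq
      simp [hlen q hq]
    simp only [build_worksheet_py, build_worksheet_py_alt, hany, Bool.false_eq_true, if_false]
    have hcols : ∀ c ∈ (((ops0, op0) :: rest).map pvCol), c.length = ops0.length + 1 := by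
      intro c hc
      rcases List.mem_map.mp hc with ⟨q, hq, rfl⟩
      rw [pv_pvCol_length, hlen q hq]
    have HO := pv_outer (((ops0, op0) :: rest).length) ops0.length ((ops0, op0) :: rest) 0
      (List.replicate (ops0.length + 1) []) (by simp) (by simp) (by simp) hlen
    simp only [Nat.cast_zero] at HO
    have hrows0 : ((List.range (ops0.length + 1)).map (fun _ => ([] : List Char)))
        = List.replicate (ops0.length + 1) [] := by simp
    rw [hrows0, HO, pv_zip_replicate]
    have hsl : (pvSepJoin ((((ops0, op0) :: rest)).map pvCol)).length = ops0.length + 1 :=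
      pv_sepJoin_length _ _ (by simp) hcols
    rw [List.take_of_length_le (le_of_eq hsl), pv_sepJoin_eq (ops0.length + 1) _ (by simp) hcols,
      List.map_map]
    rfl
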